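-- pv_equiv track=rewrite | github.com/ChenyuHeee/MultiAgentAIOPS_CMP | mABC/AIOpsChallenge_Adapt/run_mabc_and_build_submission.py | _best_vocab_match
-- ===== SOURCE A (Python) =====
-- from typing import Any, Dict, List, Optional, Sequence, Tuple
--
-- def _best_vocab_match(text: str, vocab_lower_to_token: Dict[str, str]) -> str:
--     if not text or not vocab_lower_to_token:
--         return ""
--
--     s = text.strip()
--     s_low = s.lower()
--
--     best_low = ""
--     best_len = 0
--
--     # Prefer longest prefix match with a reasonable boundary.
--     boundary_chars = set("/ .,:;?()[]{}<>\"'\t\n\r")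
--
--     for tok_low in vocab_lower_to_token.keys():
--         if not tok_low:
--             continue
--         if not s_low.startswith(tok_low):
--             continue
--         nxt_idx = len(tok_low)
--         if nxt_idx < len(s_low):
--             nxt = s_low[nxt_idx]
--             if nxt.isalnum() or nxt == "_":
--                 # Require boundary (so 'cart' won't match 'cartservice').
--                 continue
--             # hyphen is treated as a boundary because endpoints often look like 'svc-/path'.
--             if nxt not in boundary_chars and nxt != "-":
--                 continue
--         if len(tok_low) > best_len:
--             best_low = tok_low
--             best_len = len(tok_low)
--
--     if best_low:
--         return vocab_lower_to_token[best_low]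
--     return ""
-- ===== SOURCE B (Python) =====
-- def _best_vocab_match(text: str, vocab_lower_to_token: dict) -> str:
--     s_low = text.strip().lower()
--     # boundary after the token: A's two checks amount to membership in this set
--     boundary = set("/ .,:;?()[]{}<>\"'\t\n\r-")
--     for length in range(len(s_low), 0, -1):
--         if length < len(s_low) and s_low[length] not in boundary:
--             continue
--         tok = vocab_lower_to_token.get(s_low[:length])
--         if tok is not None:
--             return tok
--     return ""
-- ===== Notes on version B (the rewrite author's own statement) =====
-- stated objective: alternative
-- what changed: Instead of scanning every vocab key and testing it as a prefix of the text, B walks the prefix lengths of the stripped lowered text from longest to shortest and does one dict lookup per boundary-respecting length, returning the first hit; the per-key boundary tests of A collapse into one membership test in a boundary set that includes '-'.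
import Mathlib
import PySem

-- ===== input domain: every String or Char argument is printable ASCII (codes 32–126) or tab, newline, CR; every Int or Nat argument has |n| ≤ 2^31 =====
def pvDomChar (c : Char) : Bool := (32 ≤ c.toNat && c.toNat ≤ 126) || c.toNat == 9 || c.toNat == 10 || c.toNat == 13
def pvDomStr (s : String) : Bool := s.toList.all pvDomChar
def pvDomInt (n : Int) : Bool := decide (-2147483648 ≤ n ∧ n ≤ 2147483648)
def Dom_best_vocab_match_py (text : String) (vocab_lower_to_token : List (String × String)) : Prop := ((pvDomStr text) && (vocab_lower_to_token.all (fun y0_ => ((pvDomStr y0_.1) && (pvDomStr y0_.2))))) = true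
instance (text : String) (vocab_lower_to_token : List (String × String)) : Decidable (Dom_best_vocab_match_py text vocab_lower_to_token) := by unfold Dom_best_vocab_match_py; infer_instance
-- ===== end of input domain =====

-- B replaces A's scan over all vocab keys by a descending scan over the prefix
-- lengths of the stripped lowered text with one dict lookup per boundary-respecting length.

-- ===== PORT A =====
-- boundary_chars = set("/ .,:;?()[]{}<>\"'\t\n\r")
def pyBoundaryChars : PySem.Set Char := PySem.Set.ofList "/ .,:;?()[]{}<>\"'\t\n\r".toList

-- the body of A's `for tok_low in vocab_lower_to_token.keys():` loop
-- (the three `continue` guards, then the best-so-far update); acc = (best_low, best_len)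
def bvmStep (sLow : List Char) (acc : List Char × Nat) (tok : String) : List Char × Nat :=
  if tok.toList = [] then acc
  else if !(PySem.Chars.startswith sLow tok.toList) then acc
  else if tok.toList.length < sLow.length &&
          (let nxt := sLow.getD tok.toList.length ' '
           (PySem.Chars.isalnum nxt || nxt == '_') ||
           (!(pyBoundaryChars.contains nxt) && !(nxt == '-'))) then acc
  else if tok.toList.length > acc.2 then (tok.toList, tok.toList.length) else acc

-- `not vocab_lower_to_token` (the dict is empty) is ported as the assoc list being empty
def best_vocab_match_py (text : String) (vocab_lower_to_token : List (String × String)) : String :=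
  if text = "" ∨ vocab_lower_to_token = [] then ""
  else
    let d := PySem.Dict.ofList vocab_lower_to_token
    let s := PySem.Chars.strip text.toList
    let sLow := PySem.Chars.lower s
    let best := d.keys.foldl (bvmStep sLow) ([], 0)
    if best.1 ≠ [] then d.getD (String.ofList best.1) "" else ""

-- ===== PORT B =====
-- boundary = set("/ .,:;?()[]{}<>\"'\t\n\r-")
def pyBoundaryCharsB : PySem.Set Char := PySem.Set.ofList "/ .,:;?()[]{}<>\"'\t\n\r-".toList

-- `for length in range(len(s_low), 0, -1): …` of Source B, counting down
def bvmScan (d : PySem.Dict String String) (sLow : List Char) : Nat → String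
  | 0 => ""
  | n+1 =>
    if (n+1 < sLow.length) && !(pyBoundaryCharsB.contains (sLow.getD (n+1) ' ')) then
      bvmScan d sLow n
    else
      match d.get? (String.ofList (sLow.take (n+1))) with
      | some tok => tok
      | none => bvmScan d sLow n

def best_vocab_match_py_alt (text : String) (vocab_lower_to_token : List (String × String)) : String :=
  let sLow := PySem.Chars.lower (PySem.Chars.strip text.toList)
  bvmScan (PySem.Dict.ofList vocab_lower_to_token) sLow sLow.length

-- ===== PRECONDITION & SPEC =====
def Spec_best_vocab_match_py (text : String) (vocab_lower_to_token : List (String × String)) (out : String) : Prop := out = best_vocab_match_py_alt text vocab_lower_to_token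
instance (text : String) (vocab_lower_to_token : List (String × String)) (out : String) : Decidable (Spec_best_vocab_match_py text vocab_lower_to_token out) := by unfold Spec_best_vocab_match_py; infer_instance

-- ===== CLAIM (what is proved, stated in full; the proofs are below) =====
def Claim_equal_best_vocab_match_py : Prop := ∀ (text : String) (vocab_lower_to_token : List (String × String)), Dom_best_vocab_match_py text vocab_lower_to_token → Spec_best_vocab_match_py text vocab_lower_to_token (best_vocab_match_py text vocab_lower_to_token)

-- ===== LEMMAS AND PROOFS =====

-- A's per-key accept condition (the three guards combined)
def bvmOK (sLow : List Char) (tok : String) : Bool :=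
  tok.toList ≠ [] && PySem.Chars.startswith sLow tok.toList &&
  !(tok.toList.length < sLow.length &&
    (let nxt := sLow.getD tok.toList.length ' '
     (PySem.Chars.isalnum nxt || nxt == '_') ||
     (!(pyBoundaryChars.contains nxt) && !(nxt == '-'))))

-- B's boundary test "length = len(s_low) or s_low[length] in boundary"
def bvmBnd (sLow : List Char) (L : Nat) : Bool :=
  !(decide (L < sLow.length)) || pyBoundaryCharsB.contains (sLow.getD L ' ')

-- "length L is a hit": nonempty prefix of s_low of length L, boundary after it, and in the dict
def bvmGood (d : PySem.Dict String String) (sLow : List Char) (L : Nat) : Prop :=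
  1 ≤ L ∧ L ≤ sLow.length ∧ bvmBnd sLow L = true ∧
  d.contains (String.ofList (sLow.take L)) = true

lemma bvmStep_eq (sLow : List Char) (acc : List Char × Nat) (tok : String) :
    bvmStep sLow acc tok =
      if bvmOK sLow tok ∧ tok.toList.length > acc.2
      then (tok.toList, tok.toList.length) else acc := by
  unfold bvmStep bvmOK
  set g := (decide (tok.toList.length < sLow.length) &&
          (let nxt := sLow.getD tok.toList.length ' '
           (PySem.Chars.isalnum nxt || nxt == '_') ||
           (!(pyBoundaryChars.contains nxt) && !(nxt == '-')))) with hg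
  by_cases h1 : tok.toList = []
  · rw [if_pos h1, if_neg]
    rintro ⟨hOK, -⟩
    simp [h1] at hOK
  · by_cases h2 : PySem.Chars.startswith sLow tok.toList = true
    · cases hgg : g
      · by_cases h4 : tok.toList.length > acc.2
        · rw [if_neg h1, if_neg (by simp [h2]), if_neg (by simp), if_pos h4,
              if_pos ⟨by simp [h1, h2], h4⟩]
        · rw [if_neg h1, if_neg (by simp [h2]), if_neg (by simp), if_neg h4,
              if_neg (fun hc => h4 hc.2)]
      · rw [if_neg h1, if_neg (by simp [h2]), if_pos rfl, if_neg (by simp)]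
    · have h2' : PySem.Chars.startswith sLow tok.toList = false := by
        simpa [Bool.not_eq_true] using h2
      rw [if_neg h1, if_pos (by simp [h2']), if_neg]
      rintro ⟨hOK, -⟩
      simp [h2'] at hOK

-- the B-side boundary set is the A-side one plus '-'
lemma pyBoundaryCharsB_eq : pyBoundaryCharsB = pyBoundaryChars ++ ['-'] := by decide

lemma containsB_split (c : Char) :
    pyBoundaryCharsB.contains c = (pyBoundaryChars.contains c || c == '-') := by
  rw [pyBoundaryCharsB_eq]
  rcases eq_or_ne c '-' with rfl | h
  · simp
  · simp [h]

lemma boundary_not_alnum : ∀ x ∈ pyBoundaryChars, (PySem.Chars.isalnum x || x == '_') = false := by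
  have h : pyBoundaryChars.all (fun x => !(PySem.Chars.isalnum x || x == '_')) = true := by decide
  intro x hx
  simpa using List.all_eq_true.mp h x hx

-- no char of the boundary set is alphanumeric or '_'
lemma bnd_char (c : Char) :
    (!(PySem.Chars.isalnum c || c == '_') &&
     (pyBoundaryChars.contains c || c == '-')) = pyBoundaryCharsB.contains c := by
  rw [containsB_split]
  by_cases hA : c ∈ pyBoundaryChars
  · simp [hA, boundary_not_alnum c hA]
  · by_cases hdash : c = '-'
    · subst hdash; decide
    · simp [hA, hdash, beq_eq_false_iff_ne]

lemma bool_guard (l x y z w : Bool) :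
    (!(l && ((x || y) || (!z && !w)))) = (!l || (!(x || y) && (z || w))) := by
  cases l <;> cases x <;> cases y <;> cases z <;> cases w <;> rfl

-- A's three-guard accept condition, re-associated through the boundary set of B
lemma bvmOK_eq (sLow : List Char) (tok : String) :
    bvmOK sLow tok =
      (decide (tok.toList ≠ []) && PySem.Chars.startswith sLow tok.toList &&
       bvmBnd sLow tok.toList.length) := by
  unfold bvmOK bvmBnd
  rw [Bool.and_assoc, Bool.and_assoc]
  congr 2
  show (!(decide (tok.toList.length < sLow.length) &&
      ((PySem.Chars.isalnum (sLow.getD tok.toList.length ' ') || (sLow.getD tok.toList.length ' ') == '_') ||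
       (!(pyBoundaryChars.contains (sLow.getD tok.toList.length ' ')) && !((sLow.getD tok.toList.length ' ') == '-'))))) = _
  rw [bool_guard, bnd_char]

lemma bvmOK_iff (sLow : List Char) (tok : String) :
    bvmOK sLow tok = true ↔
      tok.toList ≠ [] ∧ tok.toList <+: sLow ∧ bvmBnd sLow tok.toList.length = true := by
  rw [bvmOK_eq]
  simp [PySem.Chars.startswith_iff, and_assoc]

-- exchange between accepted keys and good lengths
lemma good_of_key (d : PySem.Dict String String) (sLow : List Char) (k : String)
    (hk : k ∈ d.keys) (hok : bvmOK sLow k = true) :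
    bvmGood d sLow k.toList.length ∧ k.toList = sLow.take k.toList.length := by
  rw [bvmOK_iff] at hok
  obtain ⟨h1, h2, h3⟩ := hok
  have htake : k.toList = sLow.take k.toList.length := List.prefix_iff_eq_take.mp h2
  have hlen : k.toList.length ≤ sLow.length := h2.length_le
  have hpos : 1 ≤ k.toList.length := by
    cases hkl : k.toList with
    | nil => exact absurd hkl h1
    | cons a as => simp
  refine ⟨⟨hpos, hlen, h3, ?_⟩, htake⟩
  rw [← htake, String.ofList_toList]
  exact (PySem.Dict.contains_iff_mem_keys d k).mpr hk

lemma key_of_good (d : PySem.Dict String String) (sLow : List Char) (L : Nat)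
    (hg : bvmGood d sLow L) :
    ∃ k ∈ d.keys, bvmOK sLow k = true ∧ k.toList.length = L := by
  obtain ⟨h1, h2, h3, h4⟩ := hg
  refine ⟨String.ofList (sLow.take L), (PySem.Dict.contains_iff_mem_keys _ _).mp h4, ?_, ?_⟩
  · rw [bvmOK_iff]
    have hlen : (String.ofList (sLow.take L)).toList = sLow.take L := String.toList_ofList
    rw [hlen]
    have hL : (sLow.take L).length = L := by simp [List.length_take]; omega
    refine ⟨?_, List.take_prefix _ _, by rw [hL]; exact h3⟩
    intro hnil
    rw [hnil] at hL
    simp at hL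
    omega
  · rw [String.toList_ofList]
    simp [List.length_take]; omega

-- invariant of A's fold over the keys
lemma foldA_spec (sLow : List Char) : ∀ (ks : List String) (acc : List Char × Nat),
    (ks.foldl (bvmStep sLow) acc = acc ∨
      ∃ k ∈ ks, bvmOK sLow k = true ∧
        ks.foldl (bvmStep sLow) acc = (k.toList, k.toList.length)) ∧
    acc.2 ≤ (ks.foldl (bvmStep sLow) acc).2 ∧
    (∀ k ∈ ks, bvmOK sLow k = true → k.toList.length ≤ (ks.foldl (bvmStep sLow) acc).2) := by
  intro ks
  induction ks with
  | nil => intro acc; simp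
  | cons k ks ih =>
    intro acc
    simp only [List.foldl_cons]
    rw [bvmStep_eq]
    by_cases h : bvmOK sLow k = true ∧ k.toList.length > acc.2
    · rw [if_pos h]
      obtain ⟨ih1, ih2, ih3⟩ := ih (k.toList, k.toList.length)
      refine ⟨?_, by omega, ?_⟩
      · rcases ih1 with h1 | ⟨k', hk', hok', heq⟩
        · exact Or.inr ⟨k, by simp, h.1, h1⟩
        · exact Or.inr ⟨k', by simp [hk'], hok', heq⟩
      · intro k' hk' hok'
        rcases List.mem_cons.mp hk' with rfl | hk'
        · simpa using ih2
        · exact ih3 k' hk' hok'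
    · rw [if_neg h]
      obtain ⟨ih1, ih2, ih3⟩ := ih acc
      refine ⟨?_, ih2, ?_⟩
      · rcases ih1 with h1 | ⟨k', hk', hok', heq⟩
        · exact Or.inl h1
        · exact Or.inr ⟨k', by simp [hk'], hok', heq⟩
      · intro k' hk' hok'
        rcases List.mem_cons.mp hk' with rfl | hk'
        · have hle : k'.toList.length ≤ acc.2 := by
            rcases Nat.lt_or_ge acc.2 k'.toList.length with hlt | hge
            · exact absurd ⟨hok', hlt⟩ h
            · exact hge
          omega
        · exact ih3 k' hk' hok'

-- one step of B's countdown when length m+1 is not a hit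
lemma bvmScan_step_skip (d : PySem.Dict String String) (sLow : List Char) (m : Nat)
    (hn : m + 1 ≤ sLow.length) (hng : ¬ bvmGood d sLow (m + 1)) :
    bvmScan d sLow (m + 1) = bvmScan d sLow m := by
  conv_lhs => rw [bvmScan]
  by_cases hb : ((decide (m + 1 < sLow.length)) &&
      !(pyBoundaryCharsB.contains (sLow.getD (m + 1) ' '))) = true
  · rw [if_pos hb]
  · rw [if_neg hb]
    have hbnd : bvmBnd sLow (m + 1) = true := by
      unfold bvmBnd
      cases h : decide (m + 1 < sLow.length) with
      | false => simp
      | true =>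
        cases hc : pyBoundaryCharsB.contains (sLow.getD (m + 1) ' ') with
        | false => exact absurd (by simp only [h, hc]; rfl) hb
        | true => simp
    have hnc : d.contains (String.ofList (sLow.take (m + 1))) = false := by
      cases hc : d.contains (String.ofList (sLow.take (m + 1))) with
      | false => rfl
      | true => exact absurd ⟨by omega, hn, hbnd, hc⟩ hng
    rw [(PySem.Dict.get?_eq_none_iff_contains _ _).mpr hnc]

-- B's scan returns "" when no length ≤ n is a hit
lemma bvmScan_none (d : PySem.Dict String String) (sLow : List Char) :
    ∀ n, n ≤ sLow.length → (∀ L, bvmGood d sLow L → ¬ L ≤ n) →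
    bvmScan d sLow n = "" := by
  intro n
  induction n with
  | zero => intro _ _; rfl
  | succ m ih =>
    intro hn hno
    rw [bvmScan_step_skip d sLow m hn (fun hg => hno _ hg (le_refl _))]
    exact ih (by omega) (fun L hg hL => hno L hg (by omega))

-- B's scan from any n between the best hit M and len(s_low) returns the value at M
lemma bvmScan_hit (d : PySem.Dict String String) (sLow : List Char) (M : Nat)
    (hg : bvmGood d sLow M) (hmax : ∀ L, bvmGood d sLow L → L ≤ M) :
    ∀ n, M ≤ n → n ≤ sLow.length →
    bvmScan d sLow n = d.getD (String.ofList (sLow.take M)) "" := by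
  intro n
  induction n with
  | zero => intro h1 _; exact absurd (Nat.le_trans hg.1 h1) (by omega)
  | succ m ih =>
    intro hMn hn
    by_cases hM : M = m + 1
    · conv_lhs => rw [bvmScan]
      have hbnd : bvmBnd sLow (m + 1) = true := hM ▸ hg.2.2.1
      have hb : ((decide (m + 1 < sLow.length)) &&
          !(pyBoundaryCharsB.contains (sLow.getD (m + 1) ' '))) = false := by
        cases h : decide (m + 1 < sLow.length) with
        | false => simp
        | true =>
          have hcB : pyBoundaryCharsB.contains (sLow.getD (m + 1) ' ') = true := by
            unfold bvmBnd at hbnd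
            rw [h] at hbnd
            simpa only [Bool.not_true, Bool.false_or] using hbnd
          simp only [hcB]; rfl
      rw [if_neg (by rw [hb]; simp)]
      have hc : d.contains (String.ofList (sLow.take (m + 1))) = true := hM ▸ hg.2.2.2
      obtain ⟨v, hv⟩ : ∃ v, d.get? (String.ofList (sLow.take (m + 1))) = some v := by
        cases hvv : d.get? (String.ofList (sLow.take (m + 1))) with
        | none =>
          have := (PySem.Dict.get?_eq_none_iff_contains _ _).mp hvv
          simp [hc] at this
        | some v => exact ⟨v, rfl⟩
      rw [hv, hM]
      exact (PySem.Dict.getD_of_get?_eq_some _ "" hv).symm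
    · have hMm : M ≤ m := by omega
      rw [bvmScan_step_skip d sLow m hn
        (fun hgg => hM (Nat.le_antisymm (by omega) (hmax _ hgg)))]
      exact ih hMm (by omega)

-- ===== VERDICT (by name: the statement is the Claim_ definition above) =====
theorem best_vocab_match_py_spec : Claim_equal_best_vocab_match_py := by
  intro text vocab _
  unfold Spec_best_vocab_match_py best_vocab_match_py best_vocab_match_py_alt
  set d := PySem.Dict.ofList vocab with hd
  set sLow := PySem.Chars.lower (PySem.Chars.strip text.toList) with hsLow
  by_cases hguard : text = "" ∨ vocab = []
  · rw [if_pos hguard]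
    rcases hguard with rfl | rfl
    · have : sLow = [] := by rw [hsLow]; rfl
      rw [this]
      rfl
    · symm
      apply bvmScan_none d sLow sLow.length (le_refl _)
      intro L hg _
      have hc := hg.2.2.2
      rw [hd, show PySem.Dict.ofList ([] : List (String × String)) = PySem.Dict.empty from rfl,
          PySem.Dict.contains_empty] at hc
      cases hc
  · rw [if_neg hguard]
    simp only []
    obtain ⟨h1, h2, h3⟩ := foldA_spec sLow d.keys ([], 0)
    set r := d.keys.foldl (bvmStep sLow) ([], 0) with hr
    by_cases hr1 : r.1 = []
    · -- no accepted key: A returns "", and no length is good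
      have hracc : r = ([], 0) := by
        rcases h1 with h | ⟨k, hk, hok, heq⟩
        · exact h
        · rw [heq] at hr1
          have := (bvmOK_iff sLow k).mp hok
          exact absurd hr1 this.1
      rw [if_neg (by simp [hr1])]
      symm
      apply bvmScan_none d sLow sLow.length (le_refl _)
      intro L hg _
      obtain ⟨k, hk, hok, hkl⟩ := key_of_good d sLow L hg
      have hle := h3 k hk hok
      rw [hracc] at hle
      have h0 : k.toList.length = 0 := Nat.le_zero.mp hle
      have h1L := hg.1
      omega
    · rw [if_pos (by simp [hr1])]
      obtain ⟨k, hk, hok, heq⟩ : ∃ k ∈ d.keys, bvmOK sLow k = true ∧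
          r = (k.toList, k.toList.length) := by
        rcases h1 with h | h
        · rw [h] at hr1; simp at hr1
        · exact h
      obtain ⟨hgood, htake⟩ := good_of_key d sLow k hk hok
      have hmax : ∀ L, bvmGood d sLow L → L ≤ k.toList.length := by
        intro L hg
        obtain ⟨k', hk', hok', hkl'⟩ := key_of_good d sLow L hg
        have hthis : k'.toList.length ≤ k.toList.length := by
          have := h3 k' hk' hok'
          rw [heq] at this
          exact this
        omega
      have hB := bvmScan_hit d sLow k.toList.length hgood hmax sLow.length
        hgood.2.1 (le_refl _)
      have hr1eq : r.1 = k.toList := by rw [heq]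
      rw [hB, hr1eq]
      exact congrArg (fun cs => d.getD (String.ofList cs) "") htake
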